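-- pv_equiv track=rewrite | github.com/psemchyshyn/IMDB_research | literature_manag.py | amount_of_author_books
-- ===== SOURCE A (Python) =====
-- from typing import List, Tuple, Union, Callable, Dict
--
-- def amount_of_author_books(books_and_author: List[tuple]) -> Dict[str, int]:
--     """
--     A function which takes a list of tuples with the name
--     of the book and the author that wrote it. A function return
--     a dictionary with the author name as the key and with the value
--     of integer - number of books he/she wrote for the film production
--     """
--     dict_of_books = {}
--     for element in books_and_author:
--         if element[1] not in dict_of_books:
--             dict_of_books[element[1]] = 1
--         else:
--             dict_of_books[element[1]] += 1
--     return dict_of_books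
-- ===== SOURCE B (Python) =====
-- def amount_of_author_books(books_and_author):
--     """Count books per author: distinct authors first, then count each in a second pass."""
--     authors = [element[1] for element in books_and_author]
--     return {a: authors.count(a) for a in dict.fromkeys(authors)}
-- ===== Notes on version B (the rewrite author's own statement) =====
-- stated objective: alternative
-- what changed: Replaces the single accumulating dict pass with a two-phase comprehension: extract the author column, take its distinct values in first-occurrence order, and count each author's occurrences in a second pass.
import Mathlib
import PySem

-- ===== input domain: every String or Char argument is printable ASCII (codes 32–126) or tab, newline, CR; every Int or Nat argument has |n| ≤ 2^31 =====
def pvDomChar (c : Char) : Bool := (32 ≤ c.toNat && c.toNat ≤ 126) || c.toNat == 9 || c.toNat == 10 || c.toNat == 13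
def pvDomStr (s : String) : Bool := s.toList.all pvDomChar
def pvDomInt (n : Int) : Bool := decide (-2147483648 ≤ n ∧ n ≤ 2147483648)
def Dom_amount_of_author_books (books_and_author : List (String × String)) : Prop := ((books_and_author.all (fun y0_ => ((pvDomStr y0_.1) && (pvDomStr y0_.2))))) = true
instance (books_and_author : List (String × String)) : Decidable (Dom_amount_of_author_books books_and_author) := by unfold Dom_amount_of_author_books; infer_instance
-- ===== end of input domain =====

-- B counts per author in two phases (distinct authors, then a counting rescan) instead of A's single accumulating dict pass; same result.

-- ===== PORT A =====
def amount_of_author_books (books_and_author : List (String × String)) : List (String × Int) :=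
  (books_and_author.foldl
    (fun dict_of_books element =>
      if ¬ dict_of_books.contains element.2 then
        dict_of_books.insert element.2 1
      else
        dict_of_books.insert element.2 (dict_of_books.getD element.2 0 + 1))
    (PySem.Dict.empty : PySem.Dict String Int)).items

-- ===== PORT B =====
def amount_of_author_books_alt (books_and_author : List (String × String)) : List (String × Int) :=
  let authors := books_and_author.map (fun element => element.2)
  (PySem.List.dedup authors).map (fun a => (a, (PySem.List.count authors a : Int)))

-- ===== PRECONDITION & SPEC =====
def Spec_amount_of_author_books (books_and_author : List (String × String)) (out : List (String × Int)) : Prop := out = amount_of_author_books_alt books_and_author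
instance (books_and_author : List (String × String)) (out : List (String × Int)) : Decidable (Spec_amount_of_author_books books_and_author out) := by unfold Spec_amount_of_author_books; infer_instance

-- ===== CLAIM (what is proved, stated in full; the proofs are below) =====
def Claim_equal_amount_of_author_books : Prop := ∀ (books_and_author : List (String × String)), Dom_amount_of_author_books books_and_author → Spec_amount_of_author_books books_and_author (amount_of_author_books books_and_author)

-- ===== LEMMAS AND PROOFS =====

-- A's loop body is exactly Counter's update: d[k] = d.get(k, 0) + 1.
theorem stepA_eq_modify (d : PySem.Dict String Int) (e : String × String) :
    (if ¬ d.contains e.2 then d.insert e.2 1 else d.insert e.2 (d.getD e.2 0 + 1))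
      = d.modify e.2 0 (· + 1) := by
  by_cases h : d.contains e.2 = true
  · simp [h, PySem.Dict.modify]
  · simp [h, PySem.Dict.modify, PySem.Dict.getD]
    cases hg : d.get? e.2 with
    | none => simp
    | some v =>
      exfalso
      have := PySem.Dict.contains_eq_isSome_get? d e.2
      rw [hg] at this
      simp [this] at h

theorem foldA_eq_counter (l : List (String × String)) :
    l.foldl
      (fun dict_of_books element =>
        if ¬ dict_of_books.contains element.2 then
          dict_of_books.insert element.2 1
        else
          dict_of_books.insert element.2 (dict_of_books.getD element.2 0 + 1))
      (PySem.Dict.empty : PySem.Dict String Int)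
      = PySem.Dict.counter (l.map (fun e => e.2)) := by
  rw [PySem.Dict.counter_eq_foldl, List.foldl_map]
  have h : (fun (d : PySem.Dict String Int) (e : String × String) =>
      if ¬ d.contains e.2 then d.insert e.2 1 else d.insert e.2 (d.getD e.2 0 + 1))
        = fun d e => d.modify e.2 0 (· + 1) := by
    funext d e; exact stepA_eq_modify d e
  rw [h]

-- ===== VERDICT (by name: the statement is the Claim_ definition above) =====
theorem amount_of_author_books_spec : Claim_equal_amount_of_author_books := by
  intro l _
  show _ = _
  rw [amount_of_author_books, amount_of_author_books_alt, foldA_eq_counter,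
    PySem.Dict.items_counter]
  simp [PySem.List.dedup_eq_ofList, PySem.List.count]
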